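-- pv_equiv track=rewrite | github.com/ahmedlaouar/py_reasoner | src/repair/owl_conflicts.py | generate_sql_query_with_condition
-- ===== SOURCE A (Python) =====
-- def generate_sql_query_with_condition(query_str:str, successors: list):
--     query = query_str.replace(' ', '').replace('),', '), ').split()
--     first, second = query[:2]
--     # tokenize each side and remove commas and parenthesis
--     first_tokens = [token for token in first.replace(',', ' , ').replace('(', ' ( ').replace(')', ' ) ').split() if token not in [',', '(', ')']]
--     second_tokens= [token for token in second.replace(',', ' , ').replace('(', ' ( ').replace(')', ' ) ').split() if token not in [',', '(', ')']]
--     # find matching elements between first and second tokens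
--     matching_indexes = [(i, j) for i, item1 in enumerate(first_tokens[1:]) for j, item2 in enumerate(second_tokens[1:]) if item1 == item2]
--     # Generate query according to matches
--     sql_query = f"SELECT t1.id,t1.degree,t2.id,t2.degree FROM {first_tokens[0]} t1 JOIN {second_tokens[0]} t2 ON"
--     for (index0,index1) in matching_indexes:
--         sql_query += " t1.individual"+str(index0)+" = t2.individual"+str(index1)+" and"
--     sql_query = sql_query.rsplit(' ', 1)[0] # remove last trailing "and"
--     if len(successors) != 0:
--         successors_str = "("
--         for successor in successors:
--             successors_str += str(successor)+","
--         successors_str = successors_str[:-1]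
--         successors_str += ")"
--         sql_query += f" WHERE t1.degree NOT IN {successors_str} AND t2.degree NOT IN {successors_str};"
--     return sql_query
-- ===== SOURCE B (Python) =====
-- def _tokens(atom):
--     return [t for t in atom.replace(',', ' , ').replace('(', ' ( ').replace(')', ' ) ').split() if t not in (',', '(', ')')]
--
-- def generate_sql_query_with_condition(query_str: str, successors: list):
--     atoms = query_str.replace(' ', '').replace('),', '), ').split()
--     name1, *args1 = _tokens(atoms[0])
--     name2, *args2 = _tokens(atoms[1])
--     positions = {}
--     for j, tok in enumerate(args2):
--         positions.setdefault(tok, []).append(j)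
--     conds = [" t1.individual{} = t2.individual{}".format(i, j)
--              for i, tok in enumerate(args1) for j in positions.get(tok, [])]
--     sql = "SELECT t1.id,t1.degree,t2.id,t2.degree FROM {} t1 JOIN {} t2".format(name1, name2)
--     if conds:
--         sql += " ON" + " and".join(conds)
--     if successors:
--         in_list = "({})".format(",".join(str(s) for s in successors))
--         sql += " WHERE t1.degree NOT IN {} AND t2.degree NOT IN {};".format(in_list, in_list)
--     return sql
-- ===== Notes on version B (the rewrite author's own statement) =====
-- stated objective: alternative
-- what changed: B finds matching argument pairs with a one-pass dict mapping each token of the second atom to its ascending position list (replacing A's nested enumerate scan) and assembles the SQL with ' and'.join / ','.join instead of A's append-trailing-separator-then-rsplit/[:-1] tricks.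
import Mathlib
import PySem

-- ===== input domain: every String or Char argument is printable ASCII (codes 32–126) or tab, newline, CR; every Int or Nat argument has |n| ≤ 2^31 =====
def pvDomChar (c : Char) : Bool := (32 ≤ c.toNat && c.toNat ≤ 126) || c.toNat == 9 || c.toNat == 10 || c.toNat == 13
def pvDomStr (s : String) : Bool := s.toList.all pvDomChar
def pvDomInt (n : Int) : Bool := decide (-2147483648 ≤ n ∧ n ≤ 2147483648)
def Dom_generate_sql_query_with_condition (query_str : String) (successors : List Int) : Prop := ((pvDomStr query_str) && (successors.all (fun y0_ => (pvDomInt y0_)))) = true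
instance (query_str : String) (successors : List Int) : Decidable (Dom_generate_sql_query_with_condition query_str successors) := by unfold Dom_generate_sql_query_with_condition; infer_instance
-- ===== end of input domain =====

-- B replaces A's quadratic nested token scan by a one-pass dict of argument positions and
-- builds the SQL with joins instead of append-then-rsplit / trailing-comma-slice tricks.

-- shared preprocessing (identical lines in both Pythons): split the query into its atoms
def pvAtoms (query_str : String) : List String :=
  PySem.Str.split₀ (PySem.Str.replace (PySem.Str.replace query_str " " "") ")," "), ")

-- shared tokenizer (identical lines in both Pythons): pad ','/'('/')' with spaces, split, drop them
def pvTokens (s : String) : List String :=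
  (PySem.Str.split₀ (PySem.Str.replace (PySem.Str.replace (PySem.Str.replace s "," " , ") "(" " ( ") ")" " ) ")).filter
    (fun t => !(t == "," || t == "(" || t == ")"))

-- hand port of s.rsplit(' ', 1)[0] (PySem has no rsplit): everything before the LAST space,
-- or s itself when s has no space — exact on every string
def pvRsplitLast (s : String) : String :=
  let r := s.toList.reverse
  if ' ' ∈ r then String.ofList ((r.drop ((r.takeWhile (fun c => c != ' ')).length + 1)).reverse) else s

-- ===== PORT A =====
def generate_sql_query_with_condition (query_str : String) (successors : List Int) : String :=
  match pvAtoms query_str with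
  | first :: second :: _ =>
    let first_tokens := pvTokens first
    let second_tokens := pvTokens second
    let matching_indexes :=
      (PySem.List.enumerate (PySem.List.slice first_tokens (some 1) none) 0).flatMap (fun p =>
        (PySem.List.enumerate (PySem.List.slice second_tokens (some 1) none) 0).filterMap (fun q =>
          if p.2 == q.2 then some (p.1, q.1) else none))
    match first_tokens, second_tokens with
    | f0 :: _, s0 :: _ =>
      let sql0 := PySem.Str.join "" ["SELECT t1.id,t1.degree,t2.id,t2.degree FROM ", f0, " t1 JOIN ", s0, " t2 ON"]
      let sql1 := matching_indexes.foldl (fun acc ij =>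
        PySem.Str.join "" [acc, " t1.individual", PySem.Int.toStr ij.1, " = t2.individual", PySem.Int.toStr ij.2, " and"]) sql0
      let sql2 := pvRsplitLast sql1
      if successors.length ≠ 0 then
        let s1 := successors.foldl (fun acc v => PySem.Str.join "" [acc, PySem.Int.toStr v, ","]) "("
        let s2 := PySem.Str.join "" [PySem.Str.slice s1 none (some (-1)), ")"]
        PySem.Str.join "" [sql2, " WHERE t1.degree NOT IN ", s2, " AND t2.degree NOT IN ", s2, ";"]
      else sql2
    | _, _ => ""
  | _ => ""

-- ===== PORT B =====
def generate_sql_query_with_condition_alt (query_str : String) (successors : List Int) : String :=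
  match PySem.List.pyGet? (pvAtoms query_str) 0, PySem.List.pyGet? (pvAtoms query_str) 1 with
  | some a0, some a1 =>
    match pvTokens a0 with
    | name1 :: args1 =>
      match pvTokens a1 with
      | name2 :: args2 =>
        let positions := (PySem.List.enumerate args2 0).foldl
          (fun d q => d.modify q.2 ([] : List Int) (fun l => l ++ [q.1])) PySem.Dict.empty
        let conds := (PySem.List.enumerate args1 0).flatMap (fun p =>
          (positions.getD p.2 []).map (fun j =>
            PySem.Str.join "" [" t1.individual", PySem.Int.toStr p.1, " = t2.individual", PySem.Int.toStr j]))
        let sql := PySem.Str.join "" ["SELECT t1.id,t1.degree,t2.id,t2.degree FROM ", name1, " t1 JOIN ", name2, " t2"]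
        let sql := if conds.isEmpty then sql else PySem.Str.join "" [sql, " ON", PySem.Str.join " and" conds]
        if successors.isEmpty then sql
        else
          let inList := PySem.Str.join "" ["(", PySem.Str.join "," (successors.map PySem.Int.toStr), ")"]
          PySem.Str.join "" [sql, " WHERE t1.degree NOT IN ", inList, " AND t2.degree NOT IN ", inList, ";"]
      | [] => ""
    | [] => ""
  | _, _ => ""

-- ===== PRECONDITION & SPEC =====
-- Pre_ excludes exactly the inputs on which the Python A raises: fewer than two atoms after
-- the split (ValueError on unpacking) or an atom without tokens (IndexError on first_tokens[0]).
def Pre_generate_sql_query_with_condition (query_str : String) (successors : List Int) : Prop :=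
  2 ≤ (pvAtoms query_str).length ∧
    pvTokens ((pvAtoms query_str).getD 0 "") ≠ [] ∧ pvTokens ((pvAtoms query_str).getD 1 "") ≠ []
instance (query_str : String) (successors : List Int) : Decidable (Pre_generate_sql_query_with_condition query_str successors) := by
  unfold Pre_generate_sql_query_with_condition; infer_instance

def pvWitness_generate_sql_query_with_condition : String × List Int := ("p(x,y),q(y,z)", [1, 2])

def Spec_generate_sql_query_with_condition (query_str : String) (successors : List Int) (out : String) : Prop := out = generate_sql_query_with_condition_alt query_str successors
instance (query_str : String) (successors : List Int) (out : String) : Decidable (Spec_generate_sql_query_with_condition query_str successors out) := by unfold Spec_generate_sql_query_with_condition; infer_instance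

-- ===== CLAIM (what is proved, stated in full; the proofs are below) =====
def Claim_equal_generate_sql_query_with_condition : Prop := ∀ (query_str : String) (successors : List Int), Dom_generate_sql_query_with_condition query_str successors → Pre_generate_sql_query_with_condition query_str successors → Spec_generate_sql_query_with_condition query_str successors (generate_sql_query_with_condition query_str successors)

-- ===== LEMMAS AND PROOFS =====

def pvPiece (ij : Int × Int) : List Char :=
  " t1.individual".toList ++ (PySem.Int.toStr ij.1).toList ++ " = t2.individual".toList ++ (PySem.Int.toStr ij.2).toList

theorem pv_getD_positions (args2 : List String) (t : String) :
    (((PySem.List.enumerate args2 0).foldl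
        (fun d q => d.modify q.2 ([] : List Int) (fun l => l ++ [q.1])) PySem.Dict.empty).getD t [])
      = ((PySem.List.enumerate args2 0).filter (fun q => q.2 == t)).map (fun q => q.1) := by
  have h1 : ((PySem.List.enumerate args2 0).foldl
        (fun d q => d.modify q.2 ([] : List Int) (fun l => l ++ [q.1])) PySem.Dict.empty)
      = (((PySem.List.enumerate args2 0).map (fun q => (q.2, q.1))).foldl
        (fun d p => d.modify p.1 ([] : List Int) (fun l => l ++ [p.2])) PySem.Dict.empty) := by
    rw [List.foldl_map]
  rw [h1, PySem.Dict.getD_foldl_modify_append, List.filter_map, List.map_map]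
  simp [Function.comp_def]

theorem pv_filterMap_eq_filter_map {α γ : Type} (l : List α) (c : α → Bool) (f : α → γ) :
    l.filterMap (fun q => if c q then some (f q) else none) = (l.filter c).map f := by
  induction l with
  | nil => rfl
  | cons x xs ih => by_cases h : c x <;> simp [h, ih]

theorem pv_foldl_pieces (l : List (Int × Int)) (base : String) :
    (l.foldl (fun acc ij =>
        PySem.Str.join "" [acc, " t1.individual", PySem.Int.toStr ij.1, " = t2.individual", PySem.Int.toStr ij.2, " and"]) base).toList
      = base.toList ++ (l.map (fun ij => pvPiece ij ++ " and".toList)).flatten := by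
  induction l generalizing base with
  | nil => simp
  | cons v vs ih =>
    rw [List.foldl_cons, ih]
    simp [PySem.Str.toList_join, PySem.Chars.join_cons_cons, PySem.Chars.join_singleton, pvPiece]

theorem pv_foldl_succ (l : List Int) (base : String) :
    (l.foldl (fun acc v => PySem.Str.join "" [acc, PySem.Int.toStr v, ","]) base).toList
      = base.toList ++ (l.map (fun v => (PySem.Int.toStr v).toList ++ [','])).flatten := by
  induction l generalizing base with
  | nil => simp
  | cons v vs ih =>
    rw [List.foldl_cons, ih]
    simp [PySem.Str.toList_join, PySem.Chars.join_cons_cons, PySem.Chars.join_singleton]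

theorem pv_flatten_sep {α : Type} (f : α → List Char) (sep : List Char) (x : α) (l : List α) :
    ((x :: l).map (fun a => f a ++ sep)).flatten = PySem.Chars.join sep ((x :: l).map f) ++ sep := by
  induction l generalizing x with
  | nil => simp [PySem.Chars.join_singleton]
  | cons y ys ih =>
    simp only [List.map_cons, List.flatten_cons, PySem.Chars.join_cons_cons]
    rw [← List.map_cons, ← List.flatten_cons]
    rw [show ((f y ++ sep) :: List.map (fun a => f a ++ sep) ys) = (y :: ys).map (fun a => f a ++ sep) by simp]
    rw [ih y]
    simp [List.append_assoc]

theorem pv_rsplitLast_spec (s : String) (t w : List Char) (hs : s.toList = t ++ ' ' :: w) (hw : ' ' ∉ w) :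
    (pvRsplitLast s).toList = t := by
  have hrev : s.toList.reverse = w.reverse ++ ' ' :: t.reverse := by rw [hs]; simp
  have hmem : ' ' ∈ s.toList.reverse := by rw [hrev]; simp
  have htw : (s.toList.reverse.takeWhile (fun c => c != ' ')) = w.reverse := by
    rw [hrev, List.takeWhile_append_of_pos]
    · simp
    · intro x hx
      simp only [bne_iff_ne, ne_eq]
      intro h; exact hw (by simpa [h] using List.mem_reverse.mp hx)
  unfold pvRsplitLast
  simp only [hmem, if_pos]
  rw [htw]
  simp only [List.length_reverse]
  rw [hrev]
  rw [show w.reverse ++ ' ' :: t.reverse = (w.reverse ++ [' ']) ++ t.reverse by simp]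
  rw [show w.length + 1 = (w.reverse ++ [' ']).length by simp]
  rw [List.drop_left]
  simp

-- B's condition-string list is A's matching-pair list mapped through the formatter
theorem pv_conds_eq_map_matching (args1 args2 : List String) :
    ((PySem.List.enumerate args1 0).flatMap (fun p =>
        ((((PySem.List.enumerate args2 0).foldl
            (fun d q => d.modify q.2 ([] : List Int) (fun l => l ++ [q.1])) PySem.Dict.empty).getD p.2 [])).map (fun j =>
          PySem.Str.join "" [" t1.individual", PySem.Int.toStr p.1, " = t2.individual", PySem.Int.toStr j])))
      = ((PySem.List.enumerate args1 0).flatMap (fun p =>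
          (PySem.List.enumerate args2 0).filterMap (fun q =>
            if p.2 == q.2 then some (p.1, q.1) else none))).map (fun ij =>
          PySem.Str.join "" [" t1.individual", PySem.Int.toStr ij.1, " = t2.individual", PySem.Int.toStr ij.2]) := by
  rw [List.map_flatMap]
  have hfun : ∀ (p : Int × String),
      ((((PySem.List.enumerate args2 0).foldl
          (fun d q => d.modify q.2 ([] : List Int) (fun l => l ++ [q.1])) PySem.Dict.empty).getD p.2 [])).map (fun j =>
        PySem.Str.join "" [" t1.individual", PySem.Int.toStr p.1, " = t2.individual", PySem.Int.toStr j])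
      = ((PySem.List.enumerate args2 0).filterMap (fun q =>
          if p.2 == q.2 then some (p.1, q.1) else none)).map (fun ij =>
          PySem.Str.join "" [" t1.individual", PySem.Int.toStr ij.1, " = t2.individual", PySem.Int.toStr ij.2]) := by
    intro p
    rw [pv_getD_positions, List.map_map, List.map_filterMap]
    have hopt : (fun (q : Int × String) => Option.map (fun ij : Int × Int =>
        PySem.Str.join "" [" t1.individual", PySem.Int.toStr ij.1, " = t2.individual", PySem.Int.toStr ij.2])
          (if p.2 == q.2 then some (p.1, q.1) else none))
        = (fun q => if (fun (q : Int × String) => p.2 == q.2) q then some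
            (PySem.Str.join "" [" t1.individual", PySem.Int.toStr p.1, " = t2.individual", PySem.Int.toStr q.1]) else none) := by
      funext q; by_cases h : p.2 == q.2 <;> simp [h]
    rw [hopt, pv_filterMap_eq_filter_map]
    have hpred : (PySem.List.enumerate args2 0).filter (fun q => q.2 == p.2)
        = (PySem.List.enumerate args2 0).filter (fun q => p.2 == q.2) := by
      apply List.filter_congr; intro q _; exact Bool.beq_comm
    rw [hpred]
    simp [Function.comp_def]
  simp only [hfun]

-- A's ON-clause (built with trailing " and"s then rsplit) equals B's joined form
theorem pv_sqlA_eq (f0 s0 : String) (M : List (Int × Int)) :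
    (pvRsplitLast (M.foldl (fun acc ij =>
        PySem.Str.join "" [acc, " t1.individual", PySem.Int.toStr ij.1, " = t2.individual", PySem.Int.toStr ij.2, " and"])
      (PySem.Str.join "" ["SELECT t1.id,t1.degree,t2.id,t2.degree FROM ", f0, " t1 JOIN ", s0, " t2 ON"]))).toList
    = (PySem.Str.join "" ["SELECT t1.id,t1.degree,t2.id,t2.degree FROM ", f0, " t1 JOIN ", s0, " t2"]).toList
      ++ (if M.isEmpty then [] else " ON".toList ++ PySem.Chars.join " and".toList (M.map pvPiece)) := by
  have hbase : (PySem.Str.join "" ["SELECT t1.id,t1.degree,t2.id,t2.degree FROM ", f0, " t1 JOIN ", s0, " t2"]).toList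
      = ("SELECT t1.id,t1.degree,t2.id,t2.degree FROM " : String).toList ++ f0.toList
        ++ (" t1 JOIN " : String).toList ++ s0.toList ++ (" t2" : String).toList := by
    simp [PySem.Str.toList_join, PySem.Chars.join_cons_cons, PySem.Chars.join_singleton]
  have hbaseON : (PySem.Str.join "" ["SELECT t1.id,t1.degree,t2.id,t2.degree FROM ", f0, " t1 JOIN ", s0, " t2 ON"]).toList
      = ("SELECT t1.id,t1.degree,t2.id,t2.degree FROM " : String).toList ++ f0.toList
        ++ (" t1 JOIN " : String).toList ++ s0.toList ++ (" t2 ON" : String).toList := by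
    simp [PySem.Str.toList_join, PySem.Chars.join_cons_cons, PySem.Chars.join_singleton]
  match M with
  | [] =>
    rw [List.foldl_nil]
    rw [pv_rsplitLast_spec _
      (("SELECT t1.id,t1.degree,t2.id,t2.degree FROM " : String).toList ++ f0.toList
        ++ (" t1 JOIN " : String).toList ++ s0.toList ++ (" t2" : String).toList) ['O','N']
      (by rw [hbaseON,
            show (" t2 ON" : String).toList = (" t2" : String).toList ++ ' ' :: ['O','N'] from by decide]
          simp [List.append_assoc])
      (by decide)]
    simp [hbase]
  | m :: ms =>
    have hfold := pv_foldl_pieces (m :: ms) (PySem.Str.join "" ["SELECT t1.id,t1.degree,t2.id,t2.degree FROM ", f0, " t1 JOIN ", s0, " t2 ON"])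
    rw [pv_flatten_sep pvPiece (" and".toList) m ms] at hfold
    rw [pv_rsplitLast_spec _
      ((PySem.Str.join "" ["SELECT t1.id,t1.degree,t2.id,t2.degree FROM ", f0, " t1 JOIN ", s0, " t2 ON"]).toList
        ++ PySem.Chars.join " and".toList ((m :: ms).map pvPiece)) ['a','n','d']
      (by rw [hfold, show (" and" : String).toList = ' ' :: ['a','n','d'] from by decide]
          simp [List.append_assoc])
      (by decide)]
    rw [hbaseON, hbase,
      show (" t2 ON" : String).toList = (" t2" : String).toList ++ (" ON" : String).toList from by decide]
    simp [List.append_assoc]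

-- A's successor list (trailing comma then [:-1]) equals B's comma-join
theorem pv_succA_eq (u : Int) (us : List Int) :
    (PySem.Str.join "" [PySem.Str.slice ((u :: us).foldl
        (fun acc v => PySem.Str.join "" [acc, PySem.Int.toStr v, ","]) "(") none (some (-1)), ")"]).toList
    = (PySem.Str.join "" ["(", PySem.Str.join "," ((u :: us).map PySem.Int.toStr), ")"]).toList := by
  have hfold := pv_foldl_succ (u :: us) "("
  rw [pv_flatten_sep (fun v => (PySem.Int.toStr v).toList) [','] u us] at hfold
  have hslice : (PySem.Str.slice ((u :: us).foldl
      (fun acc v => PySem.Str.join "" [acc, PySem.Int.toStr v, ","]) "(") none (some (-1))).toList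
      = ("(" : String).toList ++ PySem.Chars.join [','] ((u :: us).map (fun v => (PySem.Int.toStr v).toList)) := by
    rw [PySem.Str.slice_to_neg_one, hfold, ← List.append_assoc, List.dropLast_concat]
  simp only [PySem.Str.toList_join, List.map_cons, List.map_nil,
    PySem.Chars.join_cons_cons, PySem.Chars.join_singleton]
  rw [hslice]
  simp [List.map_map, Function.comp_def]

theorem pv_sqlA2B (f0 s0 : String) (M : List (Int × Int)) :
    pvRsplitLast (M.foldl (fun acc ij =>
        PySem.Str.join "" [acc, " t1.individual", PySem.Int.toStr ij.1, " = t2.individual", PySem.Int.toStr ij.2, " and"])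
      (PySem.Str.join "" ["SELECT t1.id,t1.degree,t2.id,t2.degree FROM ", f0, " t1 JOIN ", s0, " t2 ON"]))
      = (if (M.map (fun ij => PySem.Str.join "" [" t1.individual", PySem.Int.toStr ij.1,
            " = t2.individual", PySem.Int.toStr ij.2])).isEmpty then
          PySem.Str.join "" ["SELECT t1.id,t1.degree,t2.id,t2.degree FROM ", f0, " t1 JOIN ", s0, " t2"]
        else
          PySem.Str.join "" [PySem.Str.join "" ["SELECT t1.id,t1.degree,t2.id,t2.degree FROM ", f0, " t1 JOIN ", s0, " t2"],
            " ON", PySem.Str.join " and" (M.map (fun ij => PySem.Str.join "" [" t1.individual", PySem.Int.toStr ij.1,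
            " = t2.individual", PySem.Int.toStr ij.2]))]) := by
  have hfmt : ∀ ij : Int × Int, (PySem.Str.join "" [" t1.individual", PySem.Int.toStr ij.1,
      " = t2.individual", PySem.Int.toStr ij.2]).toList = pvPiece ij := by
    intro ij
    simp [PySem.Str.toList_join, PySem.Chars.join_cons_cons, PySem.Chars.join_singleton, pvPiece]
  have hnil : ("" : String).toList = [] := by decide
  apply String.toList_inj.mp
  rw [pv_sqlA_eq]
  match M with
  | [] => simp
  | m :: ms =>
    simp only [List.map_cons, List.isEmpty_cons, Bool.false_eq_true, if_false]
    simp only [PySem.Str.toList_join, List.map_cons, List.map_nil, List.map_map, Function.comp_def,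
      hfmt, PySem.Chars.join_cons_cons, PySem.Chars.join_singleton, hnil,
      List.append_nil, List.append_assoc]

set_option maxHeartbeats 1000000 in
theorem main_eq (query_str : String) (successors : List Int)
    (hlen : 2 ≤ (pvAtoms query_str).length)
    (h0 : pvTokens ((pvAtoms query_str).getD 0 "") ≠ [])
    (h1 : pvTokens ((pvAtoms query_str).getD 1 "") ≠ []) :
    generate_sql_query_with_condition query_str successors
      = generate_sql_query_with_condition_alt query_str successors := by
  match hq : pvAtoms query_str with
  | [] => rw [hq] at hlen; simp at hlen
  | [a] => rw [hq] at hlen; simp at hlen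
  | a :: b :: rest =>
  rw [hq] at h0 h1
  simp only [List.getD_cons_zero, List.getD_cons_succ] at h0 h1
  match hft : pvTokens a, hst : pvTokens b with
  | [], _ => exact absurd hft h0
  | f0 :: args1, [] => exact absurd hst h1
  | f0 :: args1, s0 :: args2 =>
  have hg0 : PySem.List.pyGet? (a :: b :: rest) (0 : Int) = some a := by
    simp
  have hg1 : PySem.List.pyGet? (a :: b :: rest) (1 : Int) = some b := by
    simp
  unfold generate_sql_query_with_condition generate_sql_query_with_condition_alt
  simp only [hq, hg0, hg1, hft, hst]
  simp only [PySem.List.slice_from_one, List.tail_cons]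
  rw [pv_conds_eq_map_matching args1 args2]
  have hA2B := pv_sqlA2B f0 s0 ((PySem.List.enumerate args1 0).flatMap (fun p =>
      (PySem.List.enumerate args2 0).filterMap (fun q =>
        if p.2 == q.2 then some (p.1, q.1) else none)))
  match successors with
  | [] =>
    simp only [List.length_nil, ne_eq, not_true_eq_false, if_false, List.isEmpty_nil, if_true]
    exact hA2B
  | u :: us =>
    have hS := String.toList_inj.mp (pv_succA_eq u us)
    have hcondA : ((u :: us).length ≠ 0) := by simp
    simp only [if_pos hcondA, List.isEmpty_cons, Bool.false_eq_true, if_false]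
    rw [hA2B, hS]

-- ===== VERDICT (by name: the statement is the Claim_ definition above) =====
theorem generate_sql_query_with_condition_spec : Claim_equal_generate_sql_query_with_condition := by
  intro query_str successors _hdom hpre
  unfold Pre_generate_sql_query_with_condition at hpre
  unfold Spec_generate_sql_query_with_condition
  exact main_eq query_str successors hpre.1 hpre.2.1 hpre.2.2
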